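-- pv_equiv track=rewrite | github.com/Sovik89/Scaler_inter_n_advanced | intermediate_reverse_in_ranges.py | solve
-- ===== SOURCE A (Python) =====
-- def solve(A,B,C):
--
--     pos1=B
--
--     pos2=C
--
--     while pos1<pos2:
--         A[pos1],A[pos2]=A[pos2],A[pos1]
--
--         pos1+=1
--         pos2-=1
--
--
--     return A
-- ===== SOURCE B (Python) =====
-- def solve(A, B, C):
--     A[B:C+1] = A[B:C+1][::-1]
--     return A
-- ===== Notes on version B (the rewrite author's own statement) =====
-- stated objective: idiomatic
-- what changed: The element-by-element two-pointer swap loop is replaced by a single in-place slice assignment A[B:C+1] = A[B:C+1][::-1], mutating the same list object.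
-- outside the precondition, e.g. on solve([1, 2, 3, 4, 5], 0, -2): A returns [1, 2, 3, 4, 5], B returns [4, 3, 2, 1, 5]; on solve([1, 2, 3, 4, 5], -4, 3): A returns [5, 2, 3, 4, 1], B returns [1, 4, 3, 2, 5]
import Mathlib
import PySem

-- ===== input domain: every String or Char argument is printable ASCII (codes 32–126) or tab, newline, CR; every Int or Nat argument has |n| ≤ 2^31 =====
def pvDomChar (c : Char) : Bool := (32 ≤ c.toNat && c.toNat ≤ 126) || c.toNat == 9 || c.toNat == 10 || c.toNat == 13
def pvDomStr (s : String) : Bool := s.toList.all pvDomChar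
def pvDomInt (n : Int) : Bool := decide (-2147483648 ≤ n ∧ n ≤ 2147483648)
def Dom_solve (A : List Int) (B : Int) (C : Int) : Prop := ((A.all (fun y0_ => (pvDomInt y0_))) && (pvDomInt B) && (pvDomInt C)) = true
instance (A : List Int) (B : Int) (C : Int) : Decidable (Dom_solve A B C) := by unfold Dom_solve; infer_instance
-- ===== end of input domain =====

-- B replaces the two-pointer swap loop with one in-place slice assignment A[B:C+1] = A[B:C+1][::-1] (idiomatic; both mutate A in Python and return it).


-- ===== PORT A =====
-- the while loop: swap A[pos1],A[pos2] (python indexing; out-of-range = IndexError,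
-- excluded by Pre_solve, on which this port just stops)
def solveLoopA (A : List Int) (pos1 pos2 : Int) : List Int :=
  if pos1 < pos2 then
    match PySem.List.pyGet? A pos2, PySem.List.pyGet? A pos1 with
    | some y, some x =>
        solveLoopA (PySem.List.pySetD (PySem.List.pySetD A pos1 y) pos2 x) (pos1 + 1) (pos2 - 1)
    | _, _ => A  -- IndexError in Python; unreachable under Pre_solve
  else A
termination_by (pos2 - pos1).toNat
decreasing_by simp; omega

def solve (A : List Int) (B : Int) (C : Int) : List Int := solveLoopA A B C

-- ===== PORT B =====
-- slice assignment A[B:C+1] = A[B:C+1][::-1]: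
-- result = A[:st] ++ reverse (A[B:C+1]) ++ A[max st en:], st/en the clamped bounds
-- ([::-1] is list reversal: PySem.List.slice?_none_none_neg_one)
def solve_alt (A : List Int) (B : Int) (C : Int) : List Int :=
  let st := PySem.List.clampIdx A.length B
  let en := PySem.List.clampIdx A.length (C + 1)
  let s := PySem.List.slice A (some B) (some (C + 1))
  A.take st ++ s.reverse ++ A.drop (max st en)

-- ===== PRECONDITION & SPEC =====
-- Pre_ covers the task's natural domain 0 <= B and 0 <= C < len(A), plus every
-- empty-range call (C <= B whose slice A[B:C+1] has at most one element, stated with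
-- the clamped slice bounds).  Outside it A either raises IndexError or returns values
-- shaped by Python's negative-index wraparound, which slice assignment does not
-- reproduce.
def Pre_solve (A : List Int) (B : Int) (C : Int) : Prop :=
  (0 ≤ B ∧ 0 ≤ C ∧ C < (A.length : Int)) ∨
  (C ≤ B ∧ PySem.List.clampIdx A.length (C + 1) ≤ PySem.List.clampIdx A.length B + 1)
instance (A : List Int) (B : Int) (C : Int) : Decidable (Pre_solve A B C) := by
  unfold Pre_solve; infer_instance

def pvWitness_solve : List Int × Int × Int := ([1, 2, 3, 4, 5], 1, 3)

def Spec_solve (A : List Int) (B : Int) (C : Int) (out : List Int) : Prop := out = solve_alt A B C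
instance (A : List Int) (B : Int) (C : Int) (out : List Int) : Decidable (Spec_solve A B C out) := by unfold Spec_solve; infer_instance

-- ===== CLAIM (what is proved, stated in full; the proofs are below) =====
def Claim_equal_solve : Prop := ∀ (A : List Int) (B : Int) (C : Int), Dom_solve A B C → Pre_solve A B C → Spec_solve A B C (solve A B C)

-- ===== LEMMAS AND PROOFS =====

-- pointwise description of the two-pointer loop (natural-number indices)
theorem loopA_get (d : Nat) (A : List Int) (i j : Nat) (hd : j - i = d)
    (hj : j < A.length) (k : Nat) :
    (solveLoopA A i j)[k]? = if i ≤ k ∧ k ≤ j then A[i + j - k]? else A[k]? := by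
  induction d using Nat.strong_induction_on generalizing A i j with
  | _ d IH =>
    rw [solveLoopA]
    by_cases hij : (i : Int) < (j : Int)
    · have hij' : i < j := by exact_mod_cast hij
      rw [if_pos hij]
      have hi : i < A.length := by omega
      rw [PySem.List.pyGet?_natCast, PySem.List.pyGet?_natCast]
      simp only [List.getElem?_eq_getElem hj, List.getElem?_eq_getElem hi]
      simp only [PySem.List.pySetD_natCast]
      have e1 : (i : Int) + 1 = ((i + 1 : Nat) : Int) := by push_cast; ring
      have e2 : (j : Int) - 1 = ((j - 1 : Nat) : Int) := by omega
      rw [e1, e2]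
      have hlen : ((A.set i A[j]).set j A[i]).length = A.length := by simp
      rw [IH (j - 1 - (i + 1)) (by omega) _ (i + 1) (j - 1) rfl (by omega) ]
      have hget : ∀ m : Nat, ((A.set i A[j]).set j A[i])[m]? =
          if m = j then some A[i] else if m = i then some A[j] else A[m]? := by
        intro m
        simp only [List.getElem?_set, List.length_set]
        split_ifs <;> first | rfl | omega
      by_cases h1 : i + 1 ≤ k ∧ k ≤ j - 1
      · rw [if_pos h1, if_pos (by omega)]
        rw [hget]
        have : (i + 1) + (j - 1) - k = i + j - k := by omega
        rw [this, if_neg (by omega), if_neg (by omega)]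
      · rw [if_neg h1, hget]
        by_cases hkj : k = j
        · rw [if_pos hkj, if_pos (by omega)]
          have hidx : i + j - k = i := by omega
          rw [hidx, List.getElem?_eq_getElem hi]
        · rw [if_neg hkj]
          by_cases hki : k = i
          · rw [if_pos hki, if_pos (by omega)]
            have hidx : i + j - k = j := by omega
            rw [hidx, List.getElem?_eq_getElem hj]
          · rw [if_neg hki, if_neg (by omega)]
    · rw [if_neg hij]
      have hij' : ¬ (i < j) := by omega
      by_cases h : i ≤ k ∧ k ≤ j
      · rw [if_pos h]
        have : i + j - k = k := by omega
        rw [this]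
      · rw [if_neg h]

-- pointwise description of the slice assignment (natural-number indices)
theorem alt_get (A : List Int) (i j : Nat) (hj : j < A.length) (k : Nat) :
    (solve_alt A i j)[k]? = if i ≤ k ∧ k ≤ j then A[i + j - k]? else A[k]? := by
  have hcl1 : PySem.List.clampIdx A.length (i : Int) = min i A.length :=
    PySem.List.clampIdx_natCast _ _
  have e : (j : Int) + 1 = ((j + 1 : Nat) : Int) := by push_cast; ring
  have hcl2 : PySem.List.clampIdx A.length ((j : Int) + 1) = min (j + 1) A.length := by
    rw [e]; exact PySem.List.clampIdx_natCast _ _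
  have hsl : PySem.List.slice A (some (i : Int)) (some ((j : Int) + 1)) =
      (A.drop i).take (j + 1 - i) := by
    rw [e]; exact PySem.List.slice_natCast A i (j + 1)
  simp only [solve_alt, hcl1, hcl2, hsl]
  have hen : min (j + 1) A.length = j + 1 := by omega
  rw [hen]
  by_cases hij : i ≤ j
  · -- real reversal: st = i, en = j + 1
    have hst : min i A.length = i := by omega
    rw [hst]
    have hmax : max i (j + 1) = j + 1 := by omega
    rw [hmax]
    have hslen : ((A.drop i).take (j + 1 - i)).length = j + 1 - i := by
      simp; omega
    have htlen : (A.take i).length = i := by simp; omega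
    have hlen1 : (A.take i ++ ((A.drop i).take (j + 1 - i)).reverse).length = j + 1 := by
      rw [List.length_append, htlen, List.length_reverse, hslen]; omega
    by_cases hk1 : k < i
    · rw [List.getElem?_append_left (by rw [hlen1]; omega),
          List.getElem?_append_left (by rw [htlen]; omega),
          List.getElem?_take_of_lt hk1, if_neg (by omega)]
    · by_cases hk2 : k ≤ j
      · rw [List.getElem?_append_left (by rw [hlen1]; omega),
            List.getElem?_append_right (by rw [htlen]; omega), htlen,
            if_pos ⟨by omega, hk2⟩,
            List.getElem?_reverse (by rw [hslen]; omega), hslen]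
        have hidx : j + 1 - i - 1 - (k - i) = j - k := by omega
        rw [hidx, List.getElem?_take_of_lt (by omega), List.getElem?_drop]
        congr 1; omega
      · rw [List.getElem?_append_right (by rw [hlen1]; omega), hlen1,
            List.getElem?_drop, if_neg (by omega)]
        congr 1; omega
  · -- empty slice: the whole thing is A
    have hslnil : (A.drop i).take (j + 1 - i) = [] := by
      have : j + 1 - i = 0 := by omega
      simp [this]
    rw [hslnil]
    have hmax : max (min i A.length) (j + 1) = min i A.length := by omega
    rw [hmax]
    simp only [List.reverse_nil, List.append_nil]
    rw [List.take_append_drop]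
    rw [if_neg (by omega)]

-- the slice assignment is a no-op whenever the clamped slice has at most one element
theorem alt_noop (A : List Int) (B C : Int)
    (h : PySem.List.clampIdx A.length (C + 1) ≤ PySem.List.clampIdx A.length B + 1) :
    solve_alt A B C = A := by
  have hs : PySem.List.slice A (some B) (some (C + 1)) =
      (A.drop (PySem.List.clampIdx A.length B)).take
        (PySem.List.clampIdx A.length (C + 1) - PySem.List.clampIdx A.length B) := rfl
  unfold solve_alt
  simp only [hs]
  set st := PySem.List.clampIdx A.length B with hst
  set en := PySem.List.clampIdx A.length (C + 1) with hen
  by_cases hle : en ≤ st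
  · have h0 : en - st = 0 := by omega
    rw [h0, List.take_zero, List.reverse_nil, List.append_nil,
        Nat.max_eq_left hle, List.take_append_drop]
  · have h1 : en = st + 1 := by omega
    have hrev : ((A.drop st).take (en - st)).reverse = (A.drop st).take 1 := by
      rw [h1, Nat.add_sub_cancel_left]
      cases A.drop st <;> simp
    rw [hrev, h1, Nat.max_eq_right (by omega)]
    have hdd : A.drop (st + 1) = (A.drop st).drop 1 := by
      rw [List.drop_drop]
    rw [hdd, List.append_assoc, List.take_append_drop, List.take_append_drop]

-- ===== VERDICT (by name: the statement is the Claim_ definition above) =====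
theorem solve_spec : Claim_equal_solve := by
  intro A B C _ hpre
  unfold Spec_solve solve
  rcases hpre with ⟨hB, hC, hClen⟩ | ⟨hCB, hcl⟩
  · have eB : B = ((B.toNat : Nat) : Int) := by omega
    have eC : C = ((C.toNat : Nat) : Int) := by omega
    rw [eB, eC]
    apply List.ext_getElem?
    intro k
    rw [loopA_get (C.toNat - B.toNat) A B.toNat C.toNat rfl (by omega) k,
        alt_get A B.toNat C.toNat (by omega) k]
  · rw [solveLoopA, if_neg (by omega), alt_noop A B C hcl]
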